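-- pv_equiv track=rewrite | github.com/nangdev/codingtest_ready | programmers_Lv2/14.py | solution
-- ===== SOURCE A (Python) =====
-- def solution(arr):
--     rearr = []
--     coparr = []
--
--     # 원소 복사(그냥 대입하면 참조값 겹쳐서 수정사항 반영됨)
--     for l in arr:
--         coparr += [l]
--
--     l = len(arr)
--     count = 0
--
--     for i in [2,3,5,7]:
--         temp = []
--
--         for j in coparr:
--             if j % i == 0:
--                 temp.append(j//i)
--
--         # 다 나눠졌다면
--         if l == len(temp):
--             rearr += [i]
--             count += 1
--             # 나눈 원소들로 포문에 리스트를 교체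
--             coparr = temp
--
--     ans = 1
--     # 2 3 5 7 중에 하나라도 다 나눠진 경우
--     if count >= 1:
--         for k in rearr:
--             ans *= k
--     # 공약수가 없는 경우
--     else:
--         for k in arr:
--             ans *= k
--
--
--     return ans
-- ===== SOURCE B (Python) =====
-- def solution(arr):
--     primes = [p for p in (2, 3, 5, 7) if all(x % p == 0 for x in arr)]
--     ans = 1
--     for k in (primes if primes else arr):
--         ans *= k
--     return ans
-- ===== Notes on version B (the rewrite author's own statement) =====
-- stated objective: simpler
-- what changed: B drops A's progressively-divided working copy of the array entirely: since the four primes are pairwise coprime, dividing out one prime never changes divisibility by another, so B tests each prime with all(x % p == 0) directly on the original array and multiplies the passing primes (or all elements if none pass).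
import Mathlib
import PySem

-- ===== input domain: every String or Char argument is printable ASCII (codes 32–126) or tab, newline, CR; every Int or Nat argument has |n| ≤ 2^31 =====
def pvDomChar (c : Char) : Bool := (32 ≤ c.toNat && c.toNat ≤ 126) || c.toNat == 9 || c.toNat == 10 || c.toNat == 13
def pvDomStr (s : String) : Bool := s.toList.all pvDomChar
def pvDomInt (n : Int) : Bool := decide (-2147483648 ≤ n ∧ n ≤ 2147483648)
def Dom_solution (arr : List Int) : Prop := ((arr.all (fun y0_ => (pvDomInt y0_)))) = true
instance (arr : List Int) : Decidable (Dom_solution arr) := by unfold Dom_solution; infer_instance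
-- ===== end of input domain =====

-- B drops A's progressively-divided working copy: it tests each prime's divisibility
-- directly on the original array (coprimality makes the divided copy irrelevant). Objective: simpler.


-- ===== PORT A =====
-- the body of A's `for i in [2,3,5,7]` loop; state = (rearr, count, coparr)
def stepA (l : Int) (s : List Int × Int × List Int) (i : Int) : List Int × Int × List Int :=
  let temp := s.2.2.foldl
    (fun t j => if PySem.Int.mod j i == 0 then t ++ [PySem.Int.floordiv j i] else t) []
  if l = (temp.length : Int) then (s.1 ++ [i], s.2.1 + 1, temp) else s

def solution (arr : List Int) : Int :=
  let coparr := arr.foldl (fun acc l => acc ++ [l]) []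
  let l : Int := (arr.length : Int)
  let s := ([2, 3, 5, 7] : List Int).foldl (stepA l) (([] : List Int), (0 : Int), coparr)
  if s.2.1 ≥ 1 then s.1.foldl (fun ans k => ans * k) 1
  else arr.foldl (fun ans k => ans * k) 1

-- ===== PORT B =====
def solution_alt (arr : List Int) : Int :=
  let primes := ([2, 3, 5, 7] : List Int).filter (fun p => arr.all (fun x => PySem.Int.mod x p == 0))
  (if primes.isEmpty then arr else primes).foldl (fun ans k => ans * k) 1

-- ===== PRECONDITION & SPEC =====
def Spec_solution (arr : List Int) (out : Int) : Prop := out = solution_alt arr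
instance (arr : List Int) (out : Int) : Decidable (Spec_solution arr out) := by unfold Spec_solution; infer_instance

-- ===== CLAIM (what is proved, stated in full; the proofs are below) =====
def Claim_equal_solution : Prop := ∀ (arr : List Int), Dom_solution arr → Spec_solution arr (solution arr)

-- ===== LEMMAS AND PROOFS =====

-- dividing out a coprime factor does not change divisibility by p
lemma dvd_ediv_iff_dvd (x d p : Int) (hd0 : 0 < d) (hdx : d ∣ x) (hcop : Int.gcd p d = 1) :
    p ∣ x / d ↔ p ∣ x := by
  obtain ⟨y, rfl⟩ := hdx
  rw [Int.mul_ediv_cancel_left _ (ne_of_gt hd0)]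
  constructor
  · exact fun h => Dvd.dvd.mul_left h d
  · exact fun h => (Int.isCoprime_iff_gcd_eq_one.mpr hcop).dvd_of_dvd_mul_left h

-- A's prime loop, run on arr with the accepted factor d already divided out, collects
-- exactly the primes of ps that divide every element of the ORIGINAL arr.
lemma go_spec (arr : List Int) (ps : List Int) (d : Int) (rearr : List Int) (count : Int)
    (hd0 : 0 < d) (hdvd : ∀ x ∈ arr, d ∣ x)
    (hps : ∀ p ∈ ps, 0 < p ∧ Int.gcd p d = 1)
    (hpair : ps.Pairwise (fun a b => Int.gcd a b = 1)) :
    ∃ c, ps.foldl (stepA (arr.length : Int)) (rearr, count, arr.map (fun x => x / d)) =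
      (rearr ++ ps.filter (fun p => arr.all (fun x => PySem.Int.mod x p == 0)),
       count + ((ps.filter (fun p => arr.all (fun x => PySem.Int.mod x p == 0))).length : Int),
       c) := by
  induction ps generalizing d rearr count with
  | nil => exact ⟨arr.map (fun x => x / d), by simp⟩
  | cons p rest ih =>
    obtain ⟨hp0, hpd⟩ := hps p (by simp)
    have hpairrest : rest.Pairwise (fun a b => Int.gcd a b = 1) := (List.pairwise_cons.mp hpair).2
    have hpr : ∀ q ∈ rest, Int.gcd q p = 1 := by
      intro q hq
      have := (List.pairwise_cons.mp hpair).1 q hq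
      rwa [Int.gcd_comm]
    -- the loop test "l == len(temp)" holds iff p divides every ORIGINAL element
    have hcond : ((arr.length : Int) =
        (((arr.map (fun x => x / d)).filter (fun j => PySem.Int.mod j p == 0)).length : Int))
        ↔ (arr.all (fun x => PySem.Int.mod x p == 0) = true) := by
      rw [Int.natCast_inj, List.all_eq_true]
      constructor
      · intro h x hx
        have h' : (((arr.map (fun x => x / d)).filter (fun j => PySem.Int.mod j p == 0)).length)
            = (arr.map (fun x => x / d)).length := by
          rw [List.length_map]; exact_mod_cast h.symm
        have hall := List.length_filter_eq_length_iff.mp h'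
        have := hall (x / d) (List.mem_map.mpr ⟨x, hx, rfl⟩)
        simp only [beq_iff_eq, PySem.Int.mod_eq_zero_iff_dvd] at this ⊢
        exact (dvd_ediv_iff_dvd x d p hd0 (hdvd x hx) hpd).mp this
      · intro h
        have : ∀ j ∈ arr.map (fun x => x / d), (PySem.Int.mod j p == 0) = true := by
          intro j hj
          obtain ⟨x, hx, rfl⟩ := List.mem_map.mp hj
          have := h x hx
          simp only [beq_iff_eq, PySem.Int.mod_eq_zero_iff_dvd] at this ⊢
          exact (dvd_ediv_iff_dvd x d p hd0 (hdvd x hx) hpd).mpr this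
        rw [List.length_filter_eq_length_iff.mpr this, List.length_map]
    simp only [List.foldl_cons]
    rw [show stepA (arr.length : Int) (rearr, count, arr.map (fun x => x / d)) p =
        (if (arr.length : Int) =
            ((((arr.map (fun x => x / d)).filter (fun j => PySem.Int.mod j p == 0)).map
              (fun j => PySem.Int.floordiv j p)).length : Int)
         then (rearr ++ [p], count + 1,
              ((arr.map (fun x => x / d)).filter (fun j => PySem.Int.mod j p == 0)).map
                (fun j => PySem.Int.floordiv j p))
         else (rearr, count, arr.map (fun x => x / d))) from by
      simp only [stepA, PySem.List.foldl_append_if, List.nil_append]]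
    simp only [List.length_map]
    by_cases hP : arr.all (fun x => PySem.Int.mod x p == 0) = true
    · rw [if_pos (hcond.mpr hP)]
      have hfil : (arr.map (fun x => x / d)).filter (fun j => PySem.Int.mod j p == 0)
          = arr.map (fun x => x / d) := by
        apply List.filter_eq_self.mpr
        intro j hj
        obtain ⟨x, hx, rfl⟩ := List.mem_map.mp hj
        have := (List.all_eq_true.mp hP) x hx
        simp only [beq_iff_eq, PySem.Int.mod_eq_zero_iff_dvd] at this ⊢
        exact (dvd_ediv_iff_dvd x d p hd0 (hdvd x hx) hpd).mpr this
      have hmap : ((arr.map (fun x => x / d)).map (fun j => PySem.Int.floordiv j p))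
          = arr.map (fun x => x / (d * p)) := by
        rw [List.map_map]
        apply List.map_congr_left
        intro x hx
        obtain ⟨y, rfl⟩ := hdvd x hx
        simp only [Function.comp]
        rw [PySem.Int.floordiv_eq_ediv_of_pos hp0,
          Int.mul_ediv_cancel_left _ (ne_of_gt hd0),
          Int.mul_ediv_mul_of_pos _ _ hd0]
      rw [hfil, hmap]
      have hdvd' : ∀ x ∈ arr, d * p ∣ x := by
        intro x hx
        have hpx : p ∣ x := by
          have := (List.all_eq_true.mp hP) x hx
          simpa only [beq_iff_eq, PySem.Int.mod_eq_zero_iff_dvd] using this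
        have := ((Int.isCoprime_iff_gcd_eq_one.mpr hpd).symm).mul_dvd (hdvd x hx) hpx
        exact this
      have hps' : ∀ q ∈ rest, 0 < q ∧ Int.gcd q (d * p) = 1 := by
        intro q hq
        refine ⟨(hps q (by simp [hq])).1, ?_⟩
        have h1 : IsCoprime q d := Int.isCoprime_iff_gcd_eq_one.mpr (hps q (by simp [hq])).2
        have h2 : IsCoprime q p := Int.isCoprime_iff_gcd_eq_one.mpr (hpr q hq)
        exact Int.isCoprime_iff_gcd_eq_one.mp (h1.mul_right h2)
      obtain ⟨c, hc⟩ := ih (d * p) (rearr ++ [p]) (count + 1)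
        (by positivity) hdvd' hps' hpairrest
      refine ⟨c, ?_⟩
      rw [hc]
      simp only [List.filter_cons]
      rw [if_pos hP]
      simp only [List.append_assoc, List.singleton_append, List.length_cons, Prod.mk.injEq]
      refine ⟨by simp, by push_cast; ring, by simp⟩
    · rw [if_neg (fun h => hP (hcond.mp h))]
      obtain ⟨c, hc⟩ := ih d rearr count hd0 hdvd
        (fun q hq => hps q (by simp [hq])) hpairrest
      refine ⟨c, ?_⟩
      rw [hc]
      simp only [List.filter_cons]
      rw [if_neg hP]

-- ===== VERDICT (by name: the statement is the Claim_ definition above) =====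
theorem solution_spec : Claim_equal_solution := by
  intro arr _
  unfold Spec_solution solution solution_alt
  rw [PySem.List.foldl_append_singleton, List.nil_append]
  obtain ⟨c, hc⟩ := go_spec arr [2, 3, 5, 7] 1 [] 0 one_pos
    (fun x _ => one_dvd x) (by decide) (by decide)
  rw [show (arr.map fun x => x / (1 : Int)) = arr from by simp] at hc
  dsimp only
  rw [hc]
  simp only [List.nil_append, zero_add]
  by_cases hE : (([2, 3, 5, 7] : List Int).filter
      (fun p => arr.all (fun x => PySem.Int.mod x p == 0))).isEmpty = true
  · rw [List.isEmpty_iff] at hE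
    rw [hE]
    simp
  · rw [if_neg hE]
    have hlen : 0 < (([2, 3, 5, 7] : List Int).filter
        (fun p => arr.all (fun x => PySem.Int.mod x p == 0))).length := by
      rw [List.length_pos_iff]
      simpa [List.isEmpty_iff] using hE
    rw [if_pos (by exact_mod_cast hlen)]
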